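-- pv_equiv track=rewrite | github.com/Lawrencepyx/Lossless-Image-Compressor | LosslessCompressor.py | huffman_code
-- ===== SOURCE A (Python) =====
-- def huffman_code(length_table):
--
--     index = []
--     huffman_codes = {}
--
--     for ind, x in enumerate(length_table):
--         if x > 0:
--             i = (x, ind)
--             index.append(i)
--
--     if not index:
--         # no pixel with any height
--         return huffman_codes
--
--     index.sort()
--     c = 0
--     prev = index[0][0]
--     # shifting left for the code length difference
--
--     for x, y in index:
--         # shift if code length changes
--         if x != prev:
--             c = c << (x - prev)
--             prev = x
--          #put current huffman code to y
--         huffman_codes[y] = (c, x)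
--         c = c + 1
--
--     return huffman_codes
-- ===== SOURCE B (Python) =====
-- def huffman_code(length_table):
--     # RFC-1951 canonical construction: histogram the code lengths, derive the
--     # first code of every length from the histogram alone, then hand out
--     # next_code[l], next_code[l]+1, ... per symbol (objective: alternative).
--     counts = {}
--     for x in length_table:
--         if x > 0:
--             counts[x] = counts.get(x, 0) + 1
--     next_code = {}
--     code = 0
--     prev = None
--     for l in sorted(counts):
--         if prev is not None:
--             code = (code + counts[prev]) << (l - prev)
--         next_code[l] = code
--         prev = l
--     huffman_codes = {}
--     for ind in sorted((i for i, x in enumerate(length_table) if x > 0),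
--                       key=lambda i: (length_table[i], i)):
--         l = length_table[ind]
--         huffman_codes[ind] = (next_code[l], l)
--         next_code[l] += 1
--     return huffman_codes
-- ===== Notes on version B (the rewrite author's own statement) =====
-- stated objective: alternative
-- what changed: A sorts all (length, index) pairs and assigns codes with one running counter that is shifted at every length change; B uses the RFC-1951 canonical construction: it histograms the code lengths, precomputes the first code of every length from the histogram alone, and then hands out next_code[length]++ per symbol.
import Mathlib
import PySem

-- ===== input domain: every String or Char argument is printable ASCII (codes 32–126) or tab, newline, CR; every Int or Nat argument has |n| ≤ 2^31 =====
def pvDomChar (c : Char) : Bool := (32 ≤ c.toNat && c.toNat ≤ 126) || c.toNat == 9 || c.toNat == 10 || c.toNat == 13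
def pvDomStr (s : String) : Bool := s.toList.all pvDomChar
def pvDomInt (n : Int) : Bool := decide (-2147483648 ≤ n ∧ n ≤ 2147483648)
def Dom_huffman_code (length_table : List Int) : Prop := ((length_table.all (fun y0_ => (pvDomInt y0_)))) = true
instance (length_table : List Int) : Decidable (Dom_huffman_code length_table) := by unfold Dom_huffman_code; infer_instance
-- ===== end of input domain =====

-- B replaces A's sort of all (length, index) pairs plus running shifted counter by the
-- RFC-1951 canonical construction: a histogram of the code lengths, the first code of
-- every length precomputed from the histogram, then next_code[l]++ per symbol
-- (objective: alternative).

-- ===== PORT A =====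
-- loop body of A's code-assignment loop ('for x, y in index: …'), state (dict, c, prev)
def pvStepA (st : PySem.Dict Int (Int × Int) × Int × Int) (i : Int × Int) :
    PySem.Dict Int (Int × Int) × Int × Int :=
  -- 'c = c << (x - prev)': along the sorted traversal x ≥ prev, so '.toNat' is exact here
  let c := if i.1 ≠ st.2.2 then st.2.1 <<< (i.1 - st.2.2).toNat else st.2.1
  let prev := if i.1 ≠ st.2.2 then i.1 else st.2.2
  (st.1.insert i.2 (c, i.1), c + 1, prev)

def huffman_code (length_table : List Int) : List (Int × Int × Int) :=
  let index := (PySem.List.enumerate length_table).foldl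
    (fun acc p => if p.2 > 0 then acc ++ [(p.2, p.1)] else acc) []
  if index = [] then (PySem.Dict.empty : PySem.Dict Int (Int × Int)).items
  else
    let s := PySem.List.sorted2 index (fun i => i.1) (fun i => i.2)
    -- 'prev = index[0][0]' read after the in-place sort; guarded by the nonemptiness check
    let prev0 := (s.headD (0, 0)).1
    (s.foldl pvStepA (PySem.Dict.empty, 0, prev0)).1.items

-- ===== PORT B =====
-- B's first-code pass, body of 'for l in sorted(counts): …', state (next_code, code, prev)
def pvCodeStep (counts : PySem.Dict Int Int) (st : PySem.Dict Int Int × Int × Option Int)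
    (l : Int) : PySem.Dict Int Int × Int × Option Int :=
  -- 'if prev is not None: code = (code + counts[prev]) << (l - prev)': along the sorted
  -- keys l > prev, so '.toNat' is exact; prev is always a key of counts, so getD is exact
  let code := match st.2.2 with
    | some p => (st.2.1 + counts.getD p 0) <<< (l - p).toNat
    | none => st.2.1
  (st.1.insert l code, code, some l)

-- B's emission step: 'l = length_table[ind]; huffman_codes[ind] = (next_code[l], l);
-- next_code[l] += 1' — ind is a valid non-negative index and l a key of next_code
-- throughout, so the getD forms are exact
def pvEmitStep (t : List Int) (st : PySem.Dict Int (Int × Int) × PySem.Dict Int Int)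
    (ind : Int) : PySem.Dict Int (Int × Int) × PySem.Dict Int Int :=
  let l := (PySem.List.pyGet? t ind).getD 0
  (st.1.insert ind (st.2.getD l 0, l), st.2.insert l (st.2.getD l 0 + 1))

def huffman_code_alt (length_table : List Int) : List (Int × Int × Int) :=
  -- 'counts[x] = counts.get(x, 0) + 1' for the positive lengths
  let counts := length_table.foldl
    (fun (d : PySem.Dict Int Int) x => if x > 0 then d.insert x (d.getD x 0 + 1) else d)
    PySem.Dict.empty
  -- first-code pass over sorted(counts)
  let nc0 := (PySem.List.sorted counts.keys (fun x => x)).foldl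
    (pvCodeStep counts) (PySem.Dict.empty, 0, (none : Option Int))
  -- 'sorted((i for i, x in enumerate(length_table) if x > 0), key=lambda i: (length_table[i], i))'
  let syms := PySem.List.sorted2
    ((PySem.List.enumerate length_table).foldl
      (fun acc p => if p.2 > 0 then acc ++ [p.1] else acc) [])
    (fun i => (PySem.List.pyGet? length_table i).getD 0) (fun i => i)
  (syms.foldl (pvEmitStep length_table) (PySem.Dict.empty, nc0.1)).1.items

-- ===== PRECONDITION & SPEC =====
def Spec_huffman_code (length_table : List Int) (out : List (Int × Int × Int)) : Prop := out = huffman_code_alt length_table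
instance (length_table : List Int) (out : List (Int × Int × Int)) : Decidable (Spec_huffman_code length_table out) := by unfold Spec_huffman_code; infer_instance

-- ===== CLAIM (what is proved, stated in full; the proofs are below) =====
def Claim_equal_huffman_code : Prop := ∀ (length_table : List Int), Dom_huffman_code length_table → Spec_huffman_code length_table (huffman_code length_table)

-- ===== LEMMAS AND PROOFS =====

-- the positive entries of the enumerated table, as (index, length) pairs
def pvP (t : List Int) : List (Int × Int) :=
  (PySem.List.enumerate t).filter (fun p => decide (p.2 > 0))

-- the distinct lengths, in strictly increasing order
def pvL (t : List Int) : List Int :=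
  PySem.List.sorted (PySem.Set.ofList ((pvP t).map (fun p => p.2))) (fun x => x) false

-- the bucket of x: the indices whose length is x, ascending
def pvBucket (t : List Int) (x : Int) : List Int :=
  ((pvP t).filter (fun p => p.2 == x)).map (fun p => p.1)

-- B's histogram, as a named dict
def pvCounts (t : List Int) : PySem.Dict Int Int :=
  t.foldl (fun d x => if x > 0 then d.insert x (d.getD x 0 + 1) else d) PySem.Dict.empty

-- the common inner loop both proofs reduce a bucket to: consecutive codes from c
def pvStepBInner (x : Int) (dc : PySem.Dict Int (Int × Int) × Int) (y : Int) :
    PySem.Dict Int (Int × Int) × Int :=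
  (dc.1.insert y (dc.2, x), dc.2 + 1)

-- 'g records the first codes of the lengths L, starting after f at previous length p'
def pvAgrB (cnt g : Int → Int) : List Int → Int → Int → Prop
  | [], _, _ => True
  | l :: L, f, p => g l = (f + cnt p) <<< (l - p).toNat ∧ pvAgrB cnt g L (g l) l

lemma pv_index_eq (t : List Int) :
    (PySem.List.enumerate t).foldl
      (fun acc p => if p.2 > 0 then acc ++ [(p.2, p.1)] else acc) []
    = (pvP t).map (fun p => (p.2, p.1)) := by
  rw [PySem.List.foldl_append_ite (p := fun p : Int × Int => p.2 > 0) (f := fun p => (p.2, p.1))]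
  simp [pvP]

lemma pv_syms_eq (t : List Int) :
    (PySem.List.enumerate t).foldl
      (fun acc p => if p.2 > 0 then acc ++ [p.1] else acc) []
    = (pvP t).map (fun p => p.1) := by
  rw [PySem.List.foldl_append_ite (p := fun p : Int × Int => p.2 > 0) (f := fun p => p.1)]
  simp [pvP]

-- Python's key-less / tuple-key sort is the sort under the lexicographic key
lemma pv_sorted2_eq_sorted_lex {α : Type} (xs : List α) (k1 k2 : α → Int) :
    PySem.List.sorted2 xs k1 k2 false
    = PySem.List.sorted xs (fun i => toLex (k1 i, k2 i)) false := by
  rw [PySem.List.sorted_eq_foldl_insertBy]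
  simp only [PySem.List.sorted2]
  congr 1
  funext acc x
  congr 1
  funext a b
  by_cases h1 : k1 a < k1 b <;> by_cases h2 : k1 b < k1 a <;> by_cases h3 : k2 a < k2 b <;>
    simp [h1, h2, h3, Prod.Lex.toLex_lt_toLex] <;> omega

-- walking a nodup cover of the second components, bucket by bucket, is a permutation
lemma pv_flatMap_filter_perm (L : List Int) : ∀ (l : List (Int × Int)), L.Nodup →
    (∀ p ∈ l, p.2 ∈ L) →
    (L.flatMap (fun x => l.filter (fun p => p.2 == x))).Perm l := by
  induction L with
  | nil =>
    intro l _ hmem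
    have : l = [] := by
      cases l with
      | nil => rfl
      | cons a l' => exact absurd (hmem a (List.mem_cons_self)) (by simp)
    simp [this]
  | cons x L' ih =>
    intro l hnd hmem
    rw [List.flatMap_cons]
    have hcong : ∀ y ∈ L', l.filter (fun p => p.2 == y)
        = (l.filter (fun p => !(p.2 == x))).filter (fun p => p.2 == y) := by
      intro y hy
      have hyx : y ≠ x := by
        rintro rfl
        exact (List.nodup_cons.mp hnd).1 hy
      rw [List.filter_filter]
      apply List.filter_congr
      intro p _
      by_cases hpy : p.2 = y
      · simp [hpy, hyx]
      · simp [hpy]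
    have hflat : L'.flatMap (fun y => l.filter (fun p => p.2 == y))
        = L'.flatMap (fun y => (l.filter (fun p => !(p.2 == x))).filter (fun p => p.2 == y)) := by
      rw [List.flatMap_def, List.flatMap_def]
      congr 1
      exact List.map_congr_left hcong
    rw [hflat]
    have hperm' : (L'.flatMap (fun y => (l.filter (fun p => !(p.2 == x))).filter (fun p => p.2 == y))).Perm
        (l.filter (fun p => !(p.2 == x))) := by
      apply ih _ (List.nodup_cons.mp hnd).2
      intro p hp
      rw [List.mem_filter] at hp
      rcases List.mem_cons.mp (hmem p hp.1) with h | h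
      · rw [h] at hp
        simp at hp
      · exact h
    exact (hperm'.append_left _).trans (List.filter_append_perm _ l)

lemma pv_seq_eq_map (t : List Int) :
    (pvL t).flatMap (fun x => (pvBucket t x).map (fun y => (x, y)))
    = ((pvL t).flatMap (fun x => (pvP t).filter (fun p => p.2 == x))).map (fun p => (p.2, p.1)) := by
  rw [List.map_flatMap, List.flatMap_def, List.flatMap_def]
  congr 1
  apply List.map_congr_left
  intro x _
  rw [pvBucket, List.map_map]
  apply List.map_congr_left
  intro p hp
  have : p.2 = x := by
    rw [List.mem_filter] at hp
    exact eq_of_beq hp.2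
  simp [Function.comp, this]

lemma pv_nodup_L (t : List Int) : (pvL t).Nodup :=
  ((PySem.List.sorted_perm _ _ _).nodup_iff).mpr (PySem.Set.nodup_ofList _)

lemma pv_mem_L (t : List Int) : ∀ p ∈ pvP t, p.2 ∈ pvL t := by
  intro p hp
  rw [pvL, PySem.List.mem_sorted, PySem.Set.mem_ofList]
  exact List.mem_map_of_mem hp

-- the sorted pair list is the buckets, walked over the sorted distinct lengths
lemma pv_sorted_eq_seq (t : List Int) :
    PySem.List.sorted ((pvP t).map (fun p => (p.2, p.1))) (fun i => toLex (i.1, i.2)) false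
    = (pvL t).flatMap (fun x => (pvBucket t x).map (fun y => (x, y))) := by
  have hPpair : (pvP t).Pairwise (fun p q => p.1 < q.1) :=
    (PySem.List.pairwise_lt_enumerate t 0).filter _
  apply PySem.List.sorted_eq_of_perm_of_pairwise_lt
  · rw [pv_seq_eq_map]
    exact (pv_flatMap_filter_perm (pvL t) (pvP t) (pv_nodup_L t) (pv_mem_L t)).map _
  · rw [List.pairwise_flatMap]
    constructor
    · intro x hx
      rw [pvBucket, List.map_map, List.pairwise_map]
      refine (hPpair.filter _).imp ?_
      intro a b hab
      simp only [Function.comp]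
      rw [Prod.Lex.toLex_lt_toLex]
      simp [hab]
    · have hLpair : (pvL t).Pairwise (· < ·) := PySem.List.sorted_ofList_pairwise_lt _
      refine hLpair.imp_of_mem ?_
      intro x y hx hy hxy a ha b hb
      rw [List.mem_map] at ha hb
      obtain ⟨a', -, rfl⟩ := ha
      obtain ⟨b', -, rfl⟩ := hb
      rw [Prod.Lex.toLex_lt_toLex]
      exact Or.inl hxy

-- every member of bucket x indexes back to length x
lemma pv_bucket_get (t : List Int) (x : Int) :
    ∀ y ∈ pvBucket t x, (PySem.List.pyGet? t y).getD 0 = x := by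
  intro y hy
  rw [pvBucket, List.mem_map] at hy
  obtain ⟨p, hp, rfl⟩ := hy
  rw [List.mem_filter] at hp
  have hx : p.2 = x := eq_of_beq hp.2
  have hpe : p ∈ PySem.List.enumerate t 0 := List.mem_of_mem_filter hp.1
  rw [PySem.List.mem_enumerate_iff] at hpe
  obtain ⟨k, hk, rfl⟩ := hpe
  simp only [zero_add] at hx ⊢
  rw [PySem.List.pyGet?_natCast]
  simp [List.getElem?_eq_getElem hk, hx]

-- B's sorted symbol list is the buckets, walked over the sorted distinct lengths
lemma pv_syms_sorted (t : List Int) :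
    PySem.List.sorted2 ((pvP t).map (fun p => p.1))
      (fun i => (PySem.List.pyGet? t i).getD 0) (fun i => i) false
    = (pvL t).flatMap (fun x => pvBucket t x) := by
  rw [pv_sorted2_eq_sorted_lex]
  apply PySem.List.sorted_eq_of_perm_of_pairwise_lt
  · have h := pv_flatMap_filter_perm (pvL t) (pvP t) (pv_nodup_L t) (pv_mem_L t)
    have heq : (pvL t).flatMap (fun x => pvBucket t x)
        = ((pvL t).flatMap (fun x => (pvP t).filter (fun p => p.2 == x))).map (fun p => p.1) := by
      rw [List.map_flatMap]
      rfl
    rw [heq]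
    exact h.map _
  · rw [List.pairwise_flatMap]
    have hPpair : (pvP t).Pairwise (fun p q => p.1 < q.1) :=
      (PySem.List.pairwise_lt_enumerate t 0).filter _
    constructor
    · intro x hx
      have hpair : (pvBucket t x).Pairwise (· < ·) := by
        rw [pvBucket, List.pairwise_map]
        exact hPpair.filter _
      refine hpair.imp_of_mem ?_
      intro a b ha hb hab
      rw [Prod.Lex.toLex_lt_toLex, pv_bucket_get t x a ha, pv_bucket_get t x b hb]
      exact Or.inr ⟨rfl, hab⟩
    · have hLpair : (pvL t).Pairwise (· < ·) := PySem.List.sorted_ofList_pairwise_lt _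
      refine hLpair.imp_of_mem ?_
      intro x y hx hy hxy a ha b hb
      rw [Prod.Lex.toLex_lt_toLex, pv_bucket_get t x a ha, pv_bucket_get t y b hb]
      exact Or.inl hxy

-- the histogram's value at x is the length of bucket x (both are 0 off the lengths)
lemma pv_filter_eq_map_snd (t : List Int) :
    t.filter (fun x => decide (x > 0)) = (pvP t).map (fun p => p.2) := by
  conv_lhs => rw [← PySem.List.map_snd_enumerate t 0]
  rw [List.filter_map]
  rfl

lemma pv_counts_eq (t : List Int) :
    pvCounts t = ((pvP t).map (fun p => p.2)).foldl
      (fun d x => d.insert x (d.getD x 0 + 1)) PySem.Dict.empty := by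
  rw [pvCounts, PySem.List.foldl_ite_eq_foldl_filter (p := fun x : Int => x > 0),
    pv_filter_eq_map_snd]

lemma pv_counts_getD (t : List Int) (x : Int) :
    (pvCounts t).getD x 0 = ((pvBucket t x).length : Int) := by
  rw [pv_counts_eq, PySem.Dict.getD_foldl_insert_add_one]
  have hempty : (PySem.Dict.empty : PySem.Dict Int Int).getD x 0 = 0 := rfl
  rw [hempty, zero_add]
  congr 1
  rw [pvBucket, List.length_map, List.count_eq_countP,
    ← List.countP_eq_length_filter]
  rw [List.countP_map]
  rfl

lemma pv_counts_keys (t : List Int) :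
    (pvCounts t).keys = PySem.Set.ofList ((pvP t).map (fun p => p.2)) := by
  rw [pv_counts_eq, PySem.Dict.keys_foldl_insert]
  simp [PySem.Set.update, PySem.Set.ofList]

-- the invariant only reads g on members of the list
lemma pvAgrB_congr_g (cnt : Int → Int) :
    ∀ (L : List Int) (g g' : Int → Int) (f p : Int),
    (∀ x ∈ L, g x = g' x) → pvAgrB cnt g L f p → pvAgrB cnt g' L f p := by
  intro L
  induction L with
  | nil => intro g g' f p _ _; trivial
  | cons l L ih =>
    intro g g' f p hgg h
    obtain ⟨h1, h2⟩ := h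
    have hl := hgg l List.mem_cons_self
    refine ⟨hl ▸ h1, ?_⟩
    rw [← hl]
    exact ih g g' (g l) l (fun x hx => hgg x (List.mem_cons_of_mem _ hx)) h2

-- the first-code pass never touches a key outside the remaining length list
lemma pv_pass_frozen (counts : PySem.Dict Int Int) :
    ∀ (L : List Int) (nc : PySem.Dict Int Int) (f p k : Int), k ∉ L →
    ((L.foldl (pvCodeStep counts) (nc, f, some p)).1).getD k 0 = nc.getD k 0 := by
  intro L
  induction L with
  | nil => intro nc f p k _; rfl
  | cons l L ih =>
    intro nc f p k hk
    rw [List.foldl_cons]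
    have hkl : k ≠ l := fun h => hk (h ▸ List.mem_cons_self)
    rw [show pvCodeStep counts (nc, f, some p) l
        = (nc.insert l ((f + counts.getD p 0) <<< (l - p).toNat),
           (f + counts.getD p 0) <<< (l - p).toNat, some l) from rfl]
    rw [ih _ _ _ k (fun h => hk (List.mem_cons_of_mem _ h))]
    exact PySem.Dict.getD_insert_of_ne nc _ 0 hkl

-- the first-code pass produces exactly the invariant
lemma pv_pass (counts : PySem.Dict Int Int) :
    ∀ (L : List Int) (nc : PySem.Dict Int Int) (f p : Int), L.Nodup →
    pvAgrB (fun x => counts.getD x 0)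
      (fun x => ((L.foldl (pvCodeStep counts) (nc, f, some p)).1).getD x 0) L f p := by
  intro L
  induction L with
  | nil => intro nc f p _; trivial
  | cons l L ih =>
    intro nc f p hnd
    rw [List.foldl_cons]
    rw [show pvCodeStep counts (nc, f, some p) l
        = (nc.insert l ((f + counts.getD p 0) <<< (l - p).toNat),
           (f + counts.getD p 0) <<< (l - p).toNat, some l) from rfl]
    have hl : l ∉ L := (List.nodup_cons.mp hnd).1
    have hgl : ((L.foldl (pvCodeStep counts)
        (nc.insert l ((f + counts.getD p 0) <<< (l - p).toNat),
         (f + counts.getD p 0) <<< (l - p).toNat, some l)).1).getD l 0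
        = (f + counts.getD p 0) <<< (l - p).toNat := by
      rw [pv_pass_frozen counts L _ _ _ l hl]
      exact PySem.Dict.getD_insert_self nc l _ 0
    refine ⟨hgl, ?_⟩
    simp only [hgl]
    exact ih _ _ _ (List.nodup_cons.mp hnd).2

-- the common inner loop increments the counter once per element
lemma pv_inner_snd (x : Int) :
    ∀ (ys : List Int) (d : PySem.Dict Int (Int × Int)) (c : Int),
    (ys.foldl (pvStepBInner x) (d, c)).2 = c + (ys.length : Int) := by
  intro ys
  induction ys with
  | nil => intro d c; simp
  | cons y ys ih =>
    intro d c
    rw [List.foldl_cons, show pvStepBInner x (d, c) y = (d.insert y (c, x), c + 1) from rfl, ih]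
    simp only [List.length_cons]
    push_cast
    ring

-- A's fold over one bucket, once prev = x, is the common inner fold
lemma pv_block_same_prev (x : Int) (ys : List Int) : ∀ (d : PySem.Dict Int (Int × Int)) (c : Int),
    (ys.map (fun y => (x, y))).foldl pvStepA (d, c, x)
    = ((ys.foldl (pvStepBInner x) (d, c)).1, (ys.foldl (pvStepBInner x) (d, c)).2, x) := by
  induction ys with
  | nil => intro d c; rfl
  | cons y ys ih =>
    intro d c
    simp only [List.map_cons, List.foldl_cons]
    rw [show pvStepA (d, c, x) (x, y) = (d.insert y (c, x), c + 1, x) by simp [pvStepA]]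
    exact ih _ _

-- A's fold over one nonempty bucket from an arbitrary prev: shift once, then as above
lemma pv_block (x : Int) (ys : List Int) (hys : ys ≠ [])
    (d : PySem.Dict Int (Int × Int)) (c p : Int) :
    (ys.map (fun y => (x, y))).foldl pvStepA (d, c, p)
    = ((ys.foldl (pvStepBInner x) (d, c <<< (x - p).toNat)).1,
       (ys.foldl (pvStepBInner x) (d, c <<< (x - p).toNat)).2, x) := by
  cases ys with
  | nil => exact absurd rfl hys
  | cons y ys =>
    simp only [List.map_cons, List.foldl_cons]
    have hstep : pvStepA (d, c, p) (x, y)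
        = (d.insert y (c <<< (x - p).toNat, x), c <<< (x - p).toNat + 1, x) := by
      by_cases hxp : x = p
      · subst hxp
        simp [pvStepA, Int.shiftLeft_zero]
      · simp [pvStepA, hxp]
    rw [hstep]
    rw [show pvStepBInner x (d, c <<< (x - p).toNat) y
        = (d.insert y (c <<< (x - p).toNat, x), c <<< (x - p).toNat + 1) from rfl]
    exact pv_block_same_prev x ys _ _

-- B's emission over one bucket is the common inner fold; next_code is bumped at x only
lemma pv_emit_bucket (t : List Int) (x : Int) :
    ∀ (ys : List Int), (∀ y ∈ ys, (PySem.List.pyGet? t y).getD 0 = x) →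
    ∀ (d : PySem.Dict Int (Int × Int)) (nc : PySem.Dict Int Int),
    (ys.foldl (pvEmitStep t) (d, nc)).1 = (ys.foldl (pvStepBInner x) (d, nc.getD x 0)).1
    ∧ ∀ k, ((ys.foldl (pvEmitStep t) (d, nc)).2).getD k 0
        = if k = x then nc.getD x 0 + (ys.length : Int) else nc.getD k 0 := by
  intro ys
  induction ys with
  | nil =>
    intro _ d nc
    refine ⟨rfl, fun k => ?_⟩
    split_ifs with h
    · subst h; simp
    · rfl
  | cons y ys ih =>
    intro hys d nc
    have hy : (PySem.List.pyGet? t y).getD 0 = x := hys y List.mem_cons_self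
    have hstep : pvEmitStep t (d, nc) y
        = (d.insert y (nc.getD x 0, x), nc.insert x (nc.getD x 0 + 1)) := by
      simp only [pvEmitStep, hy]
    have hstep' : pvStepBInner x (d, nc.getD x 0) y
        = (d.insert y (nc.getD x 0, x), nc.getD x 0 + 1) := rfl
    obtain ⟨ih1, ih2⟩ := ih (fun z hz => hys z (List.mem_cons_of_mem _ hz))
      (d.insert y (nc.getD x 0, x)) (nc.insert x (nc.getD x 0 + 1))
    have hgx : (nc.insert x (nc.getD x 0 + 1)).getD x 0 = nc.getD x 0 + 1 :=
      PySem.Dict.getD_insert_self nc x _ 0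
    constructor
    · rw [List.foldl_cons, hstep, ih1, List.foldl_cons, hstep', hgx]
    · intro k
      rw [List.foldl_cons, hstep, ih2 k]
      rcases eq_or_ne k x with hk | hk
      · subst hk
        rw [if_pos rfl, if_pos rfl, hgx, List.length_cons]
        push_cast
        ring
      · rw [if_neg hk, if_neg hk]
        exact PySem.Dict.getD_insert_of_ne nc _ 0 hk

-- main correspondence: B's emission over the remaining buckets = A's fold, given that
-- next_code carries the first codes of the remaining lengths
lemma pv_main (t : List Int) :
    ∀ (L : List Int) (d : PySem.Dict Int (Int × Int)) (nc : PySem.Dict Int Int) (f p : Int),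
    L.Nodup → (∀ x ∈ L, pvBucket t x ≠ []) →
    pvAgrB (fun x => ((pvBucket t x).length : Int)) (fun x => nc.getD x 0) L f p →
    ((L.flatMap (fun x => pvBucket t x)).foldl (pvEmitStep t) (d, nc)).1
    = ((L.flatMap (fun x => (pvBucket t x).map (fun y => (x, y)))).foldl pvStepA
        (d, f + ((pvBucket t p).length : Int), p)).1 := by
  intro L
  induction L with
  | nil => intro d nc f p _ _ _; rfl
  | cons l L ih =>
    intro d nc f p hnd hne hagr
    obtain ⟨h1, h2⟩ := hagr
    rw [List.flatMap_cons, List.flatMap_cons, List.foldl_append, List.foldl_append]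
    obtain ⟨hb1, hb2⟩ := pv_emit_bucket t l (pvBucket t l) (pv_bucket_get t l) d nc
    rw [pv_block l _ (hne l List.mem_cons_self) d _ p]
    have hc : (f + ((pvBucket t p).length : Int)) <<< (l - p).toNat = nc.getD l 0 := h1.symm
    rw [hc]
    -- the full emission state after bucket l
    have hpair : (pvBucket t l).foldl (pvEmitStep t) (d, nc)
        = (((pvBucket t l).foldl (pvEmitStep t) (d, nc)).1,
           ((pvBucket t l).foldl (pvEmitStep t) (d, nc)).2) := rfl
    rw [hpair, hb1]
    rw [pv_inner_snd l (pvBucket t l) d (nc.getD l 0)]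
    rw [ih _ _ (nc.getD l 0) l (List.nodup_cons.mp hnd).2
      (fun z hz => hne z (List.mem_cons_of_mem _ hz)) ?_]
    · apply pvAgrB_congr_g _ L (fun x => nc.getD x 0) _ (nc.getD l 0) l ?_ h2
      intro x hx
      rw [hb2 x, if_neg]
      intro hxl
      exact (List.nodup_cons.mp hnd).1 (hxl ▸ hx)

-- ===== VERDICT (by name: the statement is the Claim_ definition above) =====
theorem huffman_code_spec : Claim_equal_huffman_code := by
  intro t _
  unfold Spec_huffman_code
  show huffman_code t = huffman_code_alt t
  simp only [huffman_code, huffman_code_alt]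
  rw [pv_index_eq, pv_syms_eq]
  have hck : (PySem.List.sorted
      ((t.foldl (fun (d : PySem.Dict Int Int) x =>
        if x > 0 then d.insert x (d.getD x 0 + 1) else d) PySem.Dict.empty).keys)
      (fun x : Int => x)) = pvL t := by
    rw [show (t.foldl (fun (d : PySem.Dict Int Int) x =>
        if x > 0 then d.insert x (d.getD x 0 + 1) else d) PySem.Dict.empty) = pvCounts t from rfl]
    rw [pvL, pv_counts_keys]
  rw [hck, pv_syms_sorted]
  by_cases hP : pvP t = []
  · have hL0 : pvL t = [] := by
      rw [pvL, PySem.List.sorted_eq_nil_iff]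
      simp [hP, PySem.Set.ofList]
    rw [hP, hL0]
    simp
  · have hindex : (pvP t).map (fun p => (p.2, p.1)) ≠ [] := by simp [hP]
    rw [if_neg hindex, pv_sorted2_eq_sorted_lex, pv_sorted_eq_seq]
    have hcounts : (t.foldl (fun (d : PySem.Dict Int Int) x =>
        if x > 0 then d.insert x (d.getD x 0 + 1) else d) PySem.Dict.empty) = pvCounts t := rfl
    rw [hcounts]
    have hne : ∀ x ∈ pvL t, pvBucket t x ≠ [] := by
      intro x hx
      rw [pvL, PySem.List.mem_sorted, PySem.Set.mem_ofList, List.mem_map] at hx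
      obtain ⟨p, hp, hpx⟩ := hx
      exact List.ne_nil_of_mem (List.mem_map_of_mem
        (List.mem_filter.mpr ⟨hp, by simp [hpx]⟩))
    have hLne : pvL t ≠ [] := by
      cases hc : pvP t with
      | nil => exact absurd hc hP
      | cons p0 P' =>
        have : p0.2 ∈ pvL t := by
          rw [pvL, PySem.List.mem_sorted, PySem.Set.mem_ofList]
          exact List.mem_map_of_mem (hc ▸ List.mem_cons_self)
        exact List.ne_nil_of_mem this
    have hndL : (pvL t).Nodup := pv_nodup_L t
    cases hLc : pvL t with
    | nil => exact absurd hLc hLne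
    | cons x0 L' =>
      -- A's prev0 is x0, the head of the walk
      have hb0 : pvBucket t x0 ≠ [] := hne x0 (hLc ▸ List.mem_cons_self)
      have hhead : (((x0 :: L').flatMap
          (fun x => (pvBucket t x).map (fun y => (x, y)))).headD (0, 0)).1 = x0 := by
        cases hbc : pvBucket t x0 with
        | nil => exact absurd hbc hb0
        | cons y0 ys =>
          rw [List.flatMap_cons, hbc]
          simp
      rw [hhead]
      -- the first-code pass: peel the first length
      rw [List.foldl_cons]
      rw [show pvCodeStep (pvCounts t) (PySem.Dict.empty, 0, (none : Option Int)) x0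
          = ((PySem.Dict.empty : PySem.Dict Int Int).insert x0 0, 0, some x0) from rfl]
      have hndL' : L'.Nodup := ((hLc ▸ hndL : (x0 :: L').Nodup).of_cons)
      have hx0L' : x0 ∉ L' := (List.nodup_cons.mp (hLc ▸ hndL)).1
      set nc1 := (L'.foldl (pvCodeStep (pvCounts t))
        ((PySem.Dict.empty : PySem.Dict Int Int).insert x0 0, 0, some x0)).1 with hnc1
      have hg0 : nc1.getD x0 0 = 0 := by
        rw [hnc1, pv_pass_frozen (pvCounts t) L' _ _ _ x0 hx0L']
        exact PySem.Dict.getD_insert_self _ x0 0 0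
      have hagr : pvAgrB (fun x => ((pvBucket t x).length : Int))
          (fun x => nc1.getD x 0) L' 0 x0 := by
        have h := pv_pass (pvCounts t) L'
          ((PySem.Dict.empty : PySem.Dict Int Int).insert x0 0) 0 x0 hndL'
        have hfn : (fun x => (pvCounts t).getD x 0)
            = (fun x => ((pvBucket t x).length : Int)) := by
          funext x
          exact pv_counts_getD t x
        rw [hfn] at h
        exact h
      -- peel bucket x0 on both sides
      rw [List.flatMap_cons, List.flatMap_cons, List.foldl_append, List.foldl_append]
      rw [pv_block x0 _ hb0 PySem.Dict.empty 0 x0]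
      obtain ⟨he1, he2⟩ := pv_emit_bucket t x0 (pvBucket t x0) (pv_bucket_get t x0)
        PySem.Dict.empty nc1
      have hpair : (pvBucket t x0).foldl (pvEmitStep t) (PySem.Dict.empty, nc1)
          = (((pvBucket t x0).foldl (pvEmitStep t) (PySem.Dict.empty, nc1)).1,
             ((pvBucket t x0).foldl (pvEmitStep t) (PySem.Dict.empty, nc1)).2) := rfl
      rw [hpair, he1, hg0]
      have hshift0 : (0 : Int) <<< ((x0 : Int) - x0).toNat = 0 := by
        simp
      rw [hshift0]
      rw [pv_inner_snd x0 (pvBucket t x0) PySem.Dict.empty 0]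
      rw [pv_main t L' _ _ 0 x0 hndL'
        (fun z hz => hne z (hLc ▸ List.mem_cons_of_mem _ hz)) ?_]
      apply pvAgrB_congr_g _ L' (fun x => nc1.getD x 0) _ 0 x0 ?_ hagr
      intro x hx
      rw [he2 x, if_neg]
      intro hxx0
      exact hx0L' (hxx0 ▸ hx)
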